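-- pv_equiv track=rewrite | github.com/yesi07111/Spotify-Clone | code/raft/leader_manager.py | _divide_into_ranges
-- ===== SOURCE A (Python) =====
-- from typing import List, Dict, Set
--
-- def _divide_into_ranges(start: int, end: int, num_ranges: int) -> List[tuple]:
--     """Divide un rango [start, end) en num_ranges sub-rangos"""
--     total = end - start
--     base_size = total // num_ranges
--     remainder = total % num_ranges
--
--     ranges = []
--     current = start
--
--     for i in range(num_ranges):
--         range_size = base_size + (1 if i < remainder else 0)
--         ranges.append((current, current + range_size))
--         current += range_size
--
--     return ranges
-- ===== SOURCE B (Python) =====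
-- def _divide_into_ranges(start: int, end: int, num_ranges: int):
--     total = end - start
--     base, rem = divmod(total, num_ranges)
--     bounds = [start + i * base + min(i, rem) for i in range(num_ranges + 1)]
--     return list(zip(bounds, bounds[1:]))
-- ===== Notes on version B (the rewrite author's own statement) =====
-- stated objective: alternative
-- what changed: Replaced the running `current` accumulator loop by stateless closed-form boundaries boundary(i) = start + i*base + min(i, rem), then pairs consecutive boundaries with zip.
import Mathlib
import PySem

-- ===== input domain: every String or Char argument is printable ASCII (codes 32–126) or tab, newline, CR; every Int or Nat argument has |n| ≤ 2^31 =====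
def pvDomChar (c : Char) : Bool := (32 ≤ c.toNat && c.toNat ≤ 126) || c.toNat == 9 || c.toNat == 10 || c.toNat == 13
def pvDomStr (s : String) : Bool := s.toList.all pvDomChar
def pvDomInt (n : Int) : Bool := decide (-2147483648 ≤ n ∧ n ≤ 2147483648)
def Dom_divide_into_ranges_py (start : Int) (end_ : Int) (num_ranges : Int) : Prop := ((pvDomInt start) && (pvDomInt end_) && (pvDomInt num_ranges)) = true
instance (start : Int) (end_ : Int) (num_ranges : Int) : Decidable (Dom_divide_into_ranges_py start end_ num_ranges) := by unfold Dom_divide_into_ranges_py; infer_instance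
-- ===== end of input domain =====

-- ===== PORT A =====
-- One honest line: B replaces A's running-accumulator loop with stateless closed-form boundaries paired by zip; same cost (objective: alternative).
def divide_into_ranges_py (start : Int) (end_ : Int) (num_ranges : Int) : List (Int × Int) :=
  let total := end_ - start
  let base_size := PySem.Int.floordiv total num_ranges
  let remainder := PySem.Int.mod total num_ranges
  let st := (PySem.List.pyRange 0 num_ranges 1).foldl
    (fun (st : List (Int × Int) × Int) i =>
      let range_size := base_size + (if i < remainder then 1 else 0)
      (st.1 ++ [(st.2, st.2 + range_size)], st.2 + range_size))
    ([], start)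
  st.1

-- ===== PORT B =====
def divide_into_ranges_py_alt (start : Int) (end_ : Int) (num_ranges : Int) : List (Int × Int) :=
  let total := end_ - start
  let base := PySem.Int.floordiv total num_ranges
  let rem := PySem.Int.mod total num_ranges
  let bounds := (PySem.List.pyRange 0 (num_ranges + 1) 1).map (fun i => start + i * base + min i rem)
  bounds.zip bounds.tail

-- ===== PRECONDITION & SPEC =====
-- Pre_ excludes num_ranges = 0, where both A and B raise ZeroDivisionError ('//' and divmod by zero).
def Pre_divide_into_ranges_py (start : Int) (end_ : Int) (num_ranges : Int) : Prop := num_ranges ≠ 0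
instance (start : Int) (end_ : Int) (num_ranges : Int) : Decidable (Pre_divide_into_ranges_py start end_ num_ranges) := by unfold Pre_divide_into_ranges_py; infer_instance
def pvWitness_divide_into_ranges_py : Int × Int × Int := (0, 10, 3)
def Spec_divide_into_ranges_py (start : Int) (end_ : Int) (num_ranges : Int) (out : List (Int × Int)) : Prop := out = divide_into_ranges_py_alt start end_ num_ranges
instance (start : Int) (end_ : Int) (num_ranges : Int) (out : List (Int × Int)) : Decidable (Spec_divide_into_ranges_py start end_ num_ranges out) := by unfold Spec_divide_into_ranges_py; infer_instance

-- ===== CLAIM (what is proved, stated in full; the proofs are below) =====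
def Claim_equal_divide_into_ranges_py : Prop := ∀ (start : Int) (end_ : Int) (num_ranges : Int), Dom_divide_into_ranges_py start end_ num_ranges → Pre_divide_into_ranges_py start end_ num_ranges → Spec_divide_into_ranges_py start end_ num_ranges (divide_into_ranges_py start end_ num_ranges)

-- ===== LEMMAS AND PROOFS =====

-- boundary function: position of the i-th boundary
def pvBound (start base rem : Int) (i : Int) : Int := start + i * base + min i rem

theorem pvZipConsec {α : Type} (g : Nat → α) (N : Nat) :
    ((List.range (N + 1)).map g).zip (((List.range (N + 1)).map g).tail)
      = (List.range N).map (fun k => (g k, g (k + 1))) := by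
  apply List.ext_getElem
  · simp
  · intro i h1 h2
    simp only [List.getElem_zip, List.getElem_map, List.getElem_tail, List.getElem_range]

theorem pvBoundStep (start base rem : Int) (hrem : 0 ≤ rem) (n : Nat) :
    pvBound start base rem ((n : Int) + 1)
      = pvBound start base rem (n : Int) + (base + if (n : Int) < rem then 1 else 0) := by
  have hmin : min ((n : Int) + 1) rem = min (n : Int) rem + (if (n : Int) < rem then 1 else 0) := by
    by_cases h : (n : Int) < rem <;> simp only [h, if_true, if_false] <;> omega
  unfold pvBound
  rw [hmin]
  ring

theorem pvFoldA (start base rem : Int) (hrem : 0 ≤ rem) (N : Nat) :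
    (PySem.List.pyRange 0 (N : Int) 1).foldl
      (fun (st : List (Int × Int) × Int) i =>
        (st.1 ++ [(st.2, st.2 + (base + (if i < rem then 1 else 0)))],
          st.2 + (base + (if i < rem then 1 else 0))))
      ([], start)
      = ((List.range N).map (fun (j : Nat) =>
            (pvBound start base rem (j : Int), pvBound start base rem ((j : Int) + 1))),
         pvBound start base rem (N : Int)) := by
  induction N with
  | zero =>
      simp [PySem.List.pyRange_one_eq_nil, pvBound]
      omega
  | succ n ih =>
      have hsplit : PySem.List.pyRange 0 ((n + 1 : Nat) : Int) 1
          = PySem.List.pyRange 0 (n : Int) 1 ++ [(n : Int)] := by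
        have h : ((n + 1 : Nat) : Int) = (n : Int) + 1 := by push_cast; ring
        rw [h, PySem.List.pyRange_one_succ_right (by positivity)]
      rw [hsplit, List.foldl_append, ih]
      simp only [List.foldl_cons, List.foldl_nil, List.range_succ, List.map_append, List.map_cons,
        List.map_nil]
      have hc : ((n + 1 : Nat) : Int) = (n : Int) + 1 := by push_cast; ring
      rw [hc, pvBoundStep start base rem hrem n]

-- ===== VERDICT (by name: the statement is the Claim_ definition above) =====
theorem divide_into_ranges_py_spec : Claim_equal_divide_into_ranges_py := by
  intro start end_ n _ hpre
  have hne : n ≠ 0 := hpre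
  unfold Spec_divide_into_ranges_py
  simp only [divide_into_ranges_py, divide_into_ranges_py_alt]
  by_cases hn : 0 < n
  · obtain ⟨N, rfl⟩ : ∃ N : Nat, n = (N : Int) := ⟨n.toNat, by omega⟩
    have hrem : 0 ≤ PySem.Int.mod (end_ - start) (N : Int) := PySem.Int.mod_nonneg _ hn
    rw [pvFoldA start (PySem.Int.floordiv (end_ - start) (N : Int))
      (PySem.Int.mod (end_ - start) (N : Int)) hrem N]
    have hc : ((N : Int) + 1) = ((N + 1 : Nat) : Int) := by push_cast; ring
    rw [hc, PySem.List.pyRange_one, List.map_map]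
    have hc2 : (((N + 1 : Nat) : Int) - 0).toNat = N + 1 := by omega
    rw [hc2]
    simp only [Function.comp_def, zero_add]
    rw [pvZipConsec (fun (k : Nat) => start + (k : Int) * PySem.Int.floordiv (end_ - start) (N : Int)
      + min (k : Int) (PySem.Int.mod (end_ - start) (N : Int))) N]
    apply List.map_congr_left
    intro k _
    simp only [pvBound]
    push_cast
    ring_nf
  · rw [PySem.List.pyRange_one_eq_nil (show n ≤ 0 by omega),
      PySem.List.pyRange_one_eq_nil (show n + 1 ≤ 0 by omega)]
    simp
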